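-- pv_equiv track=rewrite | github.com/Senichkaa/lab1-on-python | lab5/rect_generate.py | generate_inner_rectangle
-- ===== SOURCE A (Python) =====
-- def generate_inner_rectangle(width, height, symbol_color):
--     rectangle = [[" " for _ in range(width)] for _ in range(height)]
--     if width > 2 and height > 2:
--         offset_right = (width // 2) + 3
--         offset_down = height // 2
--         for i in range(height):
--             for j in range(width):
--                 if i == 0 or i == height - 1 or j == 0 or j == width - 1:
--                     rectangle[i][j] = symbol_color
--                 if (
--                     i >= offset_down
--                     and i < height - offset_down
--                     and j >= offset_right
--                     and j < width - offset_right
--                 ):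
--                     rectangle[i][j] = " "
--     return rectangle
-- ===== SOURCE B (Python) =====
-- def generate_inner_rectangle(width, height, symbol_color):
--     # The "clear inner region" step of the original is a no-op (its column range
--     # [width//2+3, width-width//2-3) is always empty), so the result is simply a
--     # hollow border rectangle, built here directly row by row.
--     if width > 2 and height > 2:
--         border_row = [symbol_color] * width
--         inner_row = [symbol_color] + [" "] * (width - 2) + [symbol_color]
--         return [list(border_row)] + [list(inner_row) for _ in range(height - 2)] + [list(border_row)]
--     return [[" "] * width for _ in range(height)]
-- ===== Notes on version B (the rewrite author's own statement) =====
-- stated objective: simpler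
-- what changed: Replaces the per-cell double loop with conditional writes by direct row construction: the inner-clear step is provably a no-op (its column range is always empty), so B builds the hollow rectangle from one border row and height-2 interior rows.
import Mathlib
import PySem

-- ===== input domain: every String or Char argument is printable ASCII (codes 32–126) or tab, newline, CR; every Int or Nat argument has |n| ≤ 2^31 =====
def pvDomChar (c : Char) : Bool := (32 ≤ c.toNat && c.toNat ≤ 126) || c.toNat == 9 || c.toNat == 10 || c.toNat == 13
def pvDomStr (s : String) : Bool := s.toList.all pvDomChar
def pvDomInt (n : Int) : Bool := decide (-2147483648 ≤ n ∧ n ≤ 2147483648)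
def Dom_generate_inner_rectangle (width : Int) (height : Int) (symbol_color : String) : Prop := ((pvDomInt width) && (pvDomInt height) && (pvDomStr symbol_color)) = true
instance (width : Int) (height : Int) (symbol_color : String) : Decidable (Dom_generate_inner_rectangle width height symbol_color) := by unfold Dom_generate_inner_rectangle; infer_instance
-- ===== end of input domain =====

-- B builds the hollow border rectangle directly row by row (the original's inner-clear step is a no-op); simpler decomposition, same result.


-- ===== PORT A =====
-- rectangle[i][j] = v; exact for 0 ≤ i < len(rect) and 0 ≤ j < len(rect[i]), which holds at every use below (i, j come from range(height)/range(width))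
def pvSetCell (rect : List (List String)) (i j : Int) (v : String) : List (List String) :=
  rect.modify i.toNat (fun row => row.set j.toNat v)

def generate_inner_rectangle (width : Int) (height : Int) (symbol_color : String) : List (List String) :=
  let rectangle := (PySem.List.pyRange 0 height 1).map (fun _ => (PySem.List.pyRange 0 width 1).map (fun _ => " "))
  if width > 2 ∧ height > 2 then
    let offset_right := PySem.Int.floordiv width 2 + 3
    let offset_down := PySem.Int.floordiv height 2
    (PySem.List.pyRange 0 height 1).foldl (fun rect i =>
      (PySem.List.pyRange 0 width 1).foldl (fun rect j =>
        let rect1 := if i = 0 ∨ i = height - 1 ∨ j = 0 ∨ j = width - 1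
          then pvSetCell rect i j symbol_color else rect
        if offset_down ≤ i ∧ i < height - offset_down ∧ offset_right ≤ j ∧ j < width - offset_right
          then pvSetCell rect1 i j " " else rect1) rect) rectangle
  else rectangle

-- ===== PORT B =====
def generate_inner_rectangle_alt (width : Int) (height : Int) (symbol_color : String) : List (List String) :=
  if width > 2 ∧ height > 2 then
    let border_row := List.replicate width.toNat symbol_color
    let inner_row := [symbol_color] ++ List.replicate (width - 2).toNat " " ++ [symbol_color]
    [border_row] ++ List.replicate (height - 2).toNat inner_row ++ [border_row]
  else List.replicate height.toNat (List.replicate width.toNat " ")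

-- ===== PRECONDITION & SPEC =====
def Spec_generate_inner_rectangle (width : Int) (height : Int) (symbol_color : String) (out : List (List String)) : Prop := out = generate_inner_rectangle_alt width height symbol_color
instance (width : Int) (height : Int) (symbol_color : String) (out : List (List String)) : Decidable (Spec_generate_inner_rectangle width height symbol_color out) := by unfold Spec_generate_inner_rectangle; infer_instance

-- ===== CLAIM (what is proved, stated in full; the proofs are below) =====
def Claim_equal_generate_inner_rectangle : Prop := ∀ (width : Int) (height : Int) (symbol_color : String), Dom_generate_inner_rectangle width height symbol_color → Spec_generate_inner_rectangle width height symbol_color (generate_inner_rectangle width height symbol_color)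

-- ===== LEMMAS AND PROOFS =====

-- A fold of modifications all at row index i is one modification at i.
lemma pv_foldl_modify_dist {α β : Type} (i : Nat) (g : β → α → α) :
    ∀ (L : List β) (rect : List α),
      L.foldl (fun r j => r.modify i (g j)) rect
        = rect.modify i (fun row => L.foldl (fun row j => g j row) row) := by
  intro L
  induction L with
  | nil => intro rect; exact (List.modify_id i rect).symm
  | cons a L ih =>
    intro rect
    simp only [List.foldl_cons, ih, List.modify_modify_eq]
    rfl

-- Folding conditional writes at successive indices 0..n-1 is a mapIdx.
lemma pv_foldl_range_modify {α : Type} (g : Nat → α → α) :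
    ∀ (n : Nat) (l : List α),
      (List.range n).foldl (fun r k => r.modify k (g k)) l
        = l.mapIdx (fun k x => if k < n then g k x else x) := by
  intro n
  induction n with
  | zero => intro l; apply List.ext_getElem <;> simp
  | succ n ih =>
    intro l
    rw [List.range_succ, List.foldl_append, ih]
    apply List.ext_getElem
    · simp
    · intro k hk hk'
      simp only [List.foldl_cons, List.foldl_nil]
      rw [List.getElem_modify]
      by_cases h : n = k
      · subst h
        simp only [List.getElem_mapIdx]
        simp
      · simp only [List.getElem_mapIdx]
        have hk'' : k < l.length := by simpa using hk'
        by_cases h2 : k < n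
        · simp [h, h2, Nat.lt_succ_of_lt h2]
        · have : ¬ k < n + 1 := by omega
          simp [h, h2, this]

lemma pv_foldl_range_setIf {α : Type} (c : Nat → Prop) [DecidablePred c] (v : α) :
    ∀ (n : Nat) (l : List α),
      (List.range n).foldl (fun row k => if c k then row.set k v else row) l
        = l.mapIdx (fun k x => if k < n ∧ c k then v else x) := by
  intro n
  induction n with
  | zero => intro l; apply List.ext_getElem <;> simp
  | succ n ih =>
    intro l
    rw [List.range_succ, List.foldl_append, ih]
    apply List.ext_getElem
    · by_cases h : c n <;> simp [h]
    · intro k hk hk'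
      simp only [List.foldl_cons, List.foldl_nil]
      by_cases h : c n
      · simp only [h, if_true]
        rw [List.getElem_set]
        by_cases he : n = k
        · subst he
          simp [h]
        · simp only [List.getElem_mapIdx]
          by_cases h2 : k < n
          · simp [he, h2, Nat.lt_succ_of_lt h2]
          · have : ¬ k < n + 1 := by omega
            simp [he, h2, this]
      · simp only [h, if_false]
        simp only [List.getElem_mapIdx]
        by_cases h2 : k < n
        · simp [h2, Nat.lt_succ_of_lt h2]
        · by_cases h3 : k < n + 1
          · have : k = n := by omega
            subst this
            simp [h3, h]
          · simp [h2, h3]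

-- Closed form of A's whole computation in the guarded case: a mapIdx over the all-spaces grid.
lemma pv_A_closed (w h : Int) (s : String) (hw : w > 2) (hh : h > 2) :
    generate_inner_rectangle w h s
      = (List.replicate h.toNat (List.replicate w.toNat (" " : String))).mapIdx
          (fun k row => if k < h.toNat then
            row.mapIdx (fun m x =>
              if m < w.toNat ∧ ((k : Int) = 0 ∨ (k : Int) = h - 1 ∨ (m : Int) = 0 ∨ (m : Int) = w - 1)
              then s else x)
            else row) := by
  have hfd : PySem.Int.floordiv w 2 = w / 2 := PySem.Int.floordiv_eq_ediv_of_pos (by omega)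
  have vac : ∀ i j : Int,
      ¬(PySem.Int.floordiv h 2 ≤ i ∧ i < h - PySem.Int.floordiv h 2 ∧
        PySem.Int.floordiv w 2 + 3 ≤ j ∧ j < w - (PySem.Int.floordiv w 2 + 3)) := by
    intro i j hc
    rw [hfd] at hc
    omega
  unfold generate_inner_rectangle
  simp only [if_pos (And.intro hw hh)]
  -- fuse the two per-cell conditional writes into a single row modification
  have h1 : ∀ i : Int,
      (fun (rect : List (List String)) (j : Int) =>
        let rect1 := if i = 0 ∨ i = h - 1 ∨ j = 0 ∨ j = w - 1 then pvSetCell rect i j s else rect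
        if PySem.Int.floordiv h 2 ≤ i ∧ i < h - PySem.Int.floordiv h 2 ∧
           PySem.Int.floordiv w 2 + 3 ≤ j ∧ j < w - (PySem.Int.floordiv w 2 + 3)
        then pvSetCell rect1 i j " " else rect1)
    = fun rect j => rect.modify i.toNat
        (fun row => if i = 0 ∨ i = h - 1 ∨ j = 0 ∨ j = w - 1 then row.set j.toNat s else row) := by
    intro i
    funext rect j
    show (if _ then pvSetCell _ i j " " else _) = _
    rw [if_neg (vac i j)]
    by_cases hb : i = 0 ∨ i = h - 1 ∨ j = 0 ∨ j = w - 1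
    · simp only [hb, if_true, pvSetCell]
    · simp only [hb, if_false]
      exact (List.modify_id i.toNat rect).symm
  simp only [h1]
  simp only [fun i => pv_foldl_modify_dist i.toNat
    (fun (j : Int) (row : List String) => if i = 0 ∨ i = h - 1 ∨ j = 0 ∨ j = w - 1 then row.set j.toNat s else row)
    (PySem.List.pyRange 0 w 1)]
  rw [PySem.List.pyRange_one 0 h, List.foldl_map]
  simp only [zero_add, Int.toNat_natCast]
  rw [pv_foldl_range_modify]
  simp only [List.map_const', List.length_map, List.length_range, PySem.List.length_pyRange_one, sub_zero]
  apply List.ext_getElem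
  · simp
  · intro k hk hk'
    have hkh : k < h.toNat := by simpa using hk
    simp only [List.getElem_mapIdx, List.getElem_replicate]
    rw [if_pos hkh, if_pos hkh]
    rw [PySem.List.pyRange_one 0 w, List.foldl_map]
    simp only [zero_add, Int.toNat_natCast, sub_zero]
    rw [pv_foldl_range_setIf
      (fun m : Nat => (k : Int) = 0 ∨ (k : Int) = h - 1 ∨ (m : Int) = 0 ∨ (m : Int) = w - 1)
      s w.toNat (List.replicate w.toNat " ")]

-- Indexing a bordered row/grid [a] ++ replicate n b ++ [a] (written in cons form).
lemma pv_sandwich_getElem {α : Type} (a b : α) (n j : Nat) (hj : j < n + 2) :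
    (a :: (List.replicate n b ++ [a]))[j]'(by simp; omega) = if j = 0 ∨ j = n + 1 then a else b := by
  rcases j with _ | j
  · simp
  · rw [List.getElem_cons_succ, List.getElem_append]
    by_cases h2 : j < n
    · rw [dif_pos (by simpa using h2)]
      rw [List.getElem_replicate, if_neg (by omega)]
    · rw [dif_neg (by simpa using h2)]
      have hjn : j = n := by omega
      subst hjn
      simp

-- ===== VERDICT (by name: the statement is the Claim_ definition above) =====
theorem generate_inner_rectangle_spec : Claim_equal_generate_inner_rectangle := by
  intro w h s _
  unfold Spec_generate_inner_rectangle
  by_cases hg : w > 2 ∧ h > 2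
  · obtain ⟨hw, hh⟩ := hg
    rw [pv_A_closed w h s hw hh]
    unfold generate_inner_rectangle_alt
    rw [if_pos ⟨hw, hh⟩]
    simp only []
    have hW : (w - 2).toNat = w.toNat - 2 := by omega
    have hH : (h - 2).toNat = h.toNat - 2 := by omega
    have hW3 : 3 ≤ w.toNat := by omega
    have hH3 : 3 ≤ h.toNat := by omega
    rw [hW, hH]
    apply List.ext_getElem
    · simp; omega
    · intro k hk hk'
      have hkh : k < h.toNat := by simpa using hk
      simp only [List.getElem_mapIdx, List.getElem_replicate, if_pos hkh, List.cons_append]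
      refine Eq.trans ?_ (pv_sandwich_getElem (List.replicate w.toNat s)
        ([s] ++ List.replicate (w.toNat - 2) " " ++ [s]) (h.toNat - 2) k (by omega)).symm
      by_cases hc : k = 0 ∨ k = h.toNat - 2 + 1
      · rw [if_pos hc]
        apply List.ext_getElem
        · simp
        · intro j hj hj'
          have hjw : j < w.toNat := by simpa using hj
          simp only [List.getElem_mapIdx, List.getElem_replicate]
          rw [if_pos ⟨hjw, by omega⟩]
      · rw [if_neg hc]
        apply List.ext_getElem
        · simp; omega
        · intro j hj hj'
          have hjw : j < w.toNat := by simpa using hj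
          simp only [List.cons_append]
          refine Eq.trans ?_ (pv_sandwich_getElem s " " (w.toNat - 2) j (by omega)).symm
          simp only [List.getElem_mapIdx, List.getElem_replicate]
          by_cases hj0 : j = 0 ∨ j = w.toNat - 2 + 1
          · rw [if_pos hj0, if_pos ⟨hjw, by omega⟩]
          · rw [if_neg hj0, if_neg (by omega)]
  · unfold generate_inner_rectangle generate_inner_rectangle_alt
    rw [if_neg hg, if_neg hg]
    simp only [List.map_const', PySem.List.length_pyRange_one, sub_zero]
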